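-- pv_equiv track=rewrite | github.com/XuMayi/RSLG | utils.py | context_joint
-- ===== SOURCE A (Python) =====
-- def context_joint(arr, llm):
--     joint_sentences = []
--
--     for element in arr:
--         sentences = element.strip().split("\n\n")
--         for sentence in sentences:
--             sentence = sentence.strip()
--             if sentence not in joint_sentences:
--                 joint_sentences.append(sentence)
--
--     result_text = ''
--     for i,s in enumerate(joint_sentences):
--         if len(result_text.split()) >= 3072 and llm == 'mistral':
--             break
--         result_text = result_text + "{}: ".format(i+1) + s + '\n\n'
--     result_text = result_text.strip('\n\n')
--     return result_text
-- ===== SOURCE B (Python) =====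
-- def context_joint(arr, llm):
--     # dedup with a seen-set, then a prefix-sum cutoff, then one join
--     seen = set()
--     sentences = []
--     for element in arr:
--         for part in element.strip().split("\n\n"):
--             part = part.strip()
--             if part not in seen:
--                 seen.add(part)
--                 sentences.append(part)
--     if llm == 'mistral':
--         kept = []
--         total = 0
--         for s in sentences:
--             if total >= 3072:
--                 break
--             kept.append(s)
--             total += 1 + len(s.split())
--     else:
--         kept = sentences
--     return '\n\n'.join('{}: '.format(i + 1) + s for i, s in enumerate(kept))
-- ===== Notes on version B (the rewrite author's own statement) =====
-- stated objective: faster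
-- what changed: A re-splits the whole accumulated result text to count words at every iteration and dedups via list membership; B dedups once with a seen-set and replaces the repeated re-splitting by a per-sentence prefix-sum cutoff followed by a single join.
import Mathlib
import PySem

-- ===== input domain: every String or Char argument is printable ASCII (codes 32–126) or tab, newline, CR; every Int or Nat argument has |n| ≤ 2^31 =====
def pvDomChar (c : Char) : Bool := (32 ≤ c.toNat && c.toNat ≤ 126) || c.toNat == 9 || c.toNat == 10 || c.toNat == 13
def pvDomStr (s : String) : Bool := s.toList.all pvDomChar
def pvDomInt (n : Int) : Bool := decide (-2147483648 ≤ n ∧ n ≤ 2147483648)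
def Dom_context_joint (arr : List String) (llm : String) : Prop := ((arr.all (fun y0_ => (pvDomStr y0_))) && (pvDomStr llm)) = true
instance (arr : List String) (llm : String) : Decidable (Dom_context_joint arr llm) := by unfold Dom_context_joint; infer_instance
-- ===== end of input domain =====

-- B replaces A's quadratic rescans (list-membership dedup, re-splitting the whole
-- accumulated text for the word count) by a seen-set, a per-sentence prefix-sum cutoff
-- and a single join; equivalence of return values is proved for all inputs.

-- ===== PORT A =====
-- the numbered-text loop of A: 'for i,s in enumerate(...): if len(result_text.split()) >= 3072 and llm == "mistral": break; result_text = ...'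
-- (result_text kept as List Char: Lean's own String.append is opaque to the kernel)
def ctxBuildA (llm : String) : List (Int × String) → List Char → List Char
  | [], r => r
  | (i, s) :: rest, r =>
      if 3072 ≤ (PySem.Chars.split₀ r).length ∧ llm = "mistral" then r
      else ctxBuildA llm rest (r ++ PySem.Int.toChars (i + 1) ++ ": ".toList ++ s.toList ++ "\n\n".toList)

def context_joint (arr : List String) (llm : String) : String :=
  let joint_sentences : List String := arr.foldl (fun js element =>
      ((PySem.Chars.splitOn (PySem.Str.strip element).toList "\n\n".toList).map String.ofList).foldl
        (fun js sentence =>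
          let s := PySem.Str.strip sentence
          if s ∈ js then js else js ++ [s]) js) []
  String.ofList (PySem.Chars.stripChars
    (ctxBuildA llm (PySem.List.enumerate joint_sentences 0) []) "\n\n".toList)

-- ===== PORT B =====
-- B's cutoff walk: keep sentences while the running word total (numbering token included) is < 3072
def ctxKeptB : List String → Int → List String
  | [], _ => []
  | s :: rest, total =>
      if 3072 ≤ total then []
      else s :: ctxKeptB rest (total + 1 + ((PySem.Str.split₀ s).length : Int))

def context_joint_alt (arr : List String) (llm : String) : String :=
  let st := arr.foldl (fun st element =>
      ((PySem.Chars.splitOn (PySem.Str.strip element).toList "\n\n".toList).map String.ofList).foldl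
        (fun st sentence =>
          let p := PySem.Str.strip sentence
          if p ∈ st.1 then st else (PySem.Set.add st.1 p, st.2 ++ [p])) st)
      ((PySem.Set.empty : PySem.Set String), ([] : List String))
  let kept := if llm = "mistral" then ctxKeptB st.2 0 else st.2
  PySem.Str.join "\n\n" ((PySem.List.enumerate kept 0).map
      (fun p => String.ofList (PySem.Int.toChars (p.1 + 1) ++ ": ".toList ++ p.2.toList)))

-- ===== PRECONDITION & SPEC =====
def Spec_context_joint (arr : List String) (llm : String) (out : String) : Prop := out = context_joint_alt arr llm
instance (arr : List String) (llm : String) (out : String) : Decidable (Spec_context_joint arr llm out) := by unfold Spec_context_joint; infer_instance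

-- ===== CLAIM (what is proved, stated in full; the proofs are below) =====
def Claim_equal_context_joint : Prop := ∀ (arr : List String) (llm : String), Dom_context_joint arr llm → Spec_context_joint arr llm (context_joint arr llm)

-- ===== LEMMAS AND PROOFS =====

def pvWs : Char → Bool := PySem.Chars.isspace
def pvNl : List Char := ['\n', '\n']
def pvChunk (p : Int × String) : List Char :=
  PySem.Int.toChars (p.1 + 1) ++ ':' :: ' ' :: p.2.toList
-- the word-count-driven kept prefix, Nat accumulator (spec-side mirror of A's break)
def kA (llm : String) : List String → Nat → List String
  | [], _ => []
  | s :: rest, t =>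
      if 3072 ≤ t ∧ llm = "mistral" then []
      else s :: kA llm rest (t + 1 + (PySem.Chars.split₀ s.toList).length)


lemma go_acc (s : List Char) : ∀ (cur : List Char) (acc : List (List Char)),
    PySem.Chars.split₀.go s cur acc = acc.reverse ++ PySem.Chars.split₀.go s cur [] := by
  induction s with
  | nil => intro cur acc; cases cur <;> simp [PySem.Chars.split₀.go]
  | cons c rest ih =>
    intro cur acc
    rw [PySem.Chars.split₀.go]
    conv_rhs => rw [PySem.Chars.split₀.go]
    by_cases h : PySem.Chars.isspace c = true
    · cases cur with
      | nil => simp only [h, if_true, List.isEmpty_nil]; exact ih [] acc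
      | cons x xs =>
        simp only [h, if_true, List.isEmpty_cons, if_false, Bool.false_eq_true]
        rw [ih _ ((x::xs).reverse :: acc), ih _ [(x::xs).reverse]]
        simp
    · simp only [h, Bool.false_eq_true, if_false]
      rw [ih (c :: cur) acc]

lemma go_allws (b : List Char) (hb : ∀ c ∈ b, pvWs c = true) : ∀ (cur : List Char) (acc : List (List Char)),
    PySem.Chars.split₀.go b cur acc = PySem.Chars.split₀.go [] cur acc := by
  induction b with
  | nil => intro _ _; rfl
  | cons c rest ih =>
    intro cur acc
    have hc : PySem.Chars.isspace c = true := hb c (by simp)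
    conv_lhs => rw [PySem.Chars.split₀.go]
    rw [if_pos hc]
    have ih' := ih (fun c h => hb c (by simp [h]))
    cases cur with
    | nil =>
      simp only [List.isEmpty_nil, if_true]
      exact ih' [] acc
    | cons x xs =>
      simp only [List.isEmpty_cons, Bool.false_eq_true, if_false]
      rw [ih' [] ((x::xs).reverse :: acc)]
      simp [PySem.Chars.split₀.go]

lemma go_append_allws (s b : List Char) (hb : ∀ c ∈ b, pvWs c = true) : ∀ (cur : List Char) (acc : List (List Char)),
    PySem.Chars.split₀.go (s ++ b) cur acc = PySem.Chars.split₀.go s cur acc := by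
  induction s with
  | nil => intro cur acc; rw [List.nil_append, go_allws b hb]
  | cons c rest ih =>
    intro cur acc
    rw [List.cons_append, PySem.Chars.split₀.go]
    conv_rhs => rw [PySem.Chars.split₀.go]
    by_cases h : PySem.Chars.isspace c = true
    · cases cur with
      | nil => simp only [h, if_true, List.isEmpty_nil]; exact ih [] acc
      | cons x xs =>
        simp only [h, if_true, List.isEmpty_cons, Bool.false_eq_true, if_false]
        exact ih [] _
    · simp only [h, Bool.false_eq_true, if_false]; exact ih _ acc

lemma go_push (w : List Char) (hw : ∀ c ∈ w, pvWs c = false) : ∀ (t cur : List Char) (acc : List (List Char)),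
    PySem.Chars.split₀.go (w ++ t) cur acc = PySem.Chars.split₀.go t (w.reverse ++ cur) acc := by
  induction w with
  | nil => intro t cur acc; simp
  | cons c rest ih =>
    intro t cur acc
    have hc : PySem.Chars.isspace c = false := hw c (by simp)
    rw [List.cons_append, PySem.Chars.split₀.go]
    simp only [hc, Bool.false_eq_true, if_false]
    rw [ih (fun c h => hw c (by simp [h]))]
    simp

lemma go_ws_mid (a : List Char) : ∀ (b cur : List Char) (acc : List (List Char)),
    PySem.Chars.split₀.go (a ++ '\n' :: b) cur acc
      = PySem.Chars.split₀.go (a ++ ['\n']) cur acc ++ PySem.Chars.split₀.go b [] [] := by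
  induction a with
  | nil =>
    intro b cur acc
    simp only [List.nil_append]
    rw [PySem.Chars.split₀.go]
    conv_rhs => rw [PySem.Chars.split₀.go]
    have h : PySem.Chars.isspace '\n' = true := by decide
    cases cur with
    | nil => simp [h, PySem.Chars.split₀.go, go_acc b [] acc]
    | cons x xs =>
      simp only [h, if_true, List.isEmpty_cons, Bool.false_eq_true, if_false]
      rw [go_acc b [] ((x::xs).reverse :: acc)]
      simp [PySem.Chars.split₀.go]
  | cons c rest ih =>
    intro b cur acc
    rw [List.cons_append, List.cons_append, PySem.Chars.split₀.go]
    conv_rhs => rw [PySem.Chars.split₀.go]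
    by_cases h : PySem.Chars.isspace c = true
    · cases cur with
      | nil => simp only [h, if_true, List.isEmpty_nil]; exact ih b [] acc
      | cons x xs =>
        simp only [h, if_true, List.isEmpty_cons, Bool.false_eq_true, if_false]
        exact ih b [] _
    · simp only [h, Bool.false_eq_true, if_false]; exact ih b _ acc


lemma split₀_append_nl (a b : List Char) (ha : a.getLast? = some '\n') :
    PySem.Chars.split₀ (a ++ b) = PySem.Chars.split₀ a ++ PySem.Chars.split₀ b := by
  obtain ⟨a', rfl⟩ := List.getLast?_eq_some_iff.mp ha
  show PySem.Chars.split₀.go _ [] [] = _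
  rw [List.append_assoc, List.singleton_append, go_ws_mid a' b [] []]
  rfl

lemma split₀_chunk (w y : List Char) (hw0 : w ≠ []) (hw : ∀ c ∈ w, pvWs c = false) :
    PySem.Chars.split₀ (w ++ ' ' :: (y ++ pvNl)) = w :: PySem.Chars.split₀ y := by
  show PySem.Chars.split₀.go _ [] [] = _
  rw [go_push w hw]
  conv_lhs => rw [PySem.Chars.split₀.go]
  rw [if_pos (by decide : PySem.Chars.isspace ' ' = true)]
  rw [if_neg (by simpa using hw0)]
  have hnl : ∀ c ∈ pvNl, pvWs c = true := by intro c hc; fin_cases hc <;> decide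
  rw [go_append_allws y pvNl hnl [] _]
  rw [go_acc y []]
  simp [PySem.Chars.split₀]

def HeadOK (l : List Char) : Prop := ∀ c ∈ l.head?, pvWs c = false
def LastOK (l : List Char) : Prop := ∀ c ∈ l.getLast?, pvWs c = false

lemma dropWhile_head_ok (l : List Char) : HeadOK (List.dropWhile pvWs l) := by
  intro c hc
  have := List.head?_dropWhile_not pvWs l
  rw [hc] at this
  exact this

lemma headOK_of_prefix {l m : List Char} (h : l <+: m) (hm : HeadOK m) : HeadOK l := by
  intro c hc
  obtain ⟨t, rfl⟩ := h
  apply hm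
  rw [List.head?_append_of_ne_nil]
  · exact hc
  · rintro rfl; simp at hc

lemma headOK_strip (l : List Char) : HeadOK (PySem.Chars.strip l) := by
  unfold PySem.Chars.strip PySem.Chars.rstrip PySem.Chars.lstrip
  have h := List.reverse_prefix.mpr
    (List.dropWhile_suffix (l := (List.dropWhile PySem.Chars.isspace l).reverse) PySem.Chars.isspace)
  rw [List.reverse_reverse] at h
  exact headOK_of_prefix h (dropWhile_head_ok l)

lemma lastOK_strip (l : List Char) : LastOK (PySem.Chars.strip l) := by
  unfold PySem.Chars.strip PySem.Chars.rstrip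
  intro c hc
  rw [List.getLast?_reverse] at hc
  exact dropWhile_head_ok _ c hc

def Stripped (s : String) : Prop := HeadOK s.toList ∧ LastOK s.toList

lemma stripped_strip (s : String) : Stripped (PySem.Str.strip s) := by
  constructor <;> rw [PySem.Str.toList_strip]
  · exact headOK_strip _
  · exact lastOK_strip _

-- ---- digits ----
def DigQ (c : Char) : Prop := pvWs c = false ∧ c ≠ '\n'

lemma digitChar_q (m : Nat) : DigQ m.digitChar := by
  rcases Nat.lt_or_ge m 16 with h | h
  · interval_cases m <;> exact ⟨by decide, by decide⟩
  · unfold Nat.digitChar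
    rw [if_neg (by omega), if_neg (by omega), if_neg (by omega), if_neg (by omega),
        if_neg (by omega), if_neg (by omega), if_neg (by omega), if_neg (by omega),
        if_neg (by omega), if_neg (by omega), if_neg (by omega), if_neg (by omega),
        if_neg (by omega), if_neg (by omega), if_neg (by omega), if_neg (by omega)]
    exact ⟨by decide, by decide⟩

lemma toDigitsCore_q : ∀ (fuel n : Nat) (ds : List Char), (∀ c ∈ ds, DigQ c) →
    ∀ c ∈ Nat.toDigitsCore 10 fuel n ds, DigQ c := by
  intro fuel
  induction fuel with
  | zero => intro n ds h; rw [Nat.toDigitsCore]; exact h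
  | succ fuel ih =>
    intro n ds h
    rw [Nat.toDigitsCore]
    by_cases h10 : n / 10 = 0
    · rw [if_pos h10]
      intro c hc
      rcases List.mem_cons.mp hc with rfl | hc
      · exact digitChar_q _
      · exact h c hc
    · rw [if_neg h10]
      refine ih _ _ ?_
      intro c hc
      rcases List.mem_cons.mp hc with rfl | hc
      · exact digitChar_q _
      · exact h c hc

lemma toDigitsCore_ne : ∀ (fuel n : Nat) (ds : List Char), (ds = [] → fuel ≠ 0) →
    Nat.toDigitsCore 10 fuel n ds ≠ [] := by
  intro fuel
  induction fuel with
  | zero =>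
    intro n ds h
    rw [Nat.toDigitsCore]
    intro hds; exact h hds rfl
  | succ fuel ih =>
    intro n ds _
    rw [Nat.toDigitsCore]
    by_cases h10 : n / 10 = 0
    · rw [if_pos h10]; simp
    · rw [if_neg h10]
      exact ih _ _ (by simp)

lemma toChars_q (i : Int) (hi : 0 ≤ i) :
    PySem.Int.toChars (i + 1) ≠ [] ∧ ∀ c ∈ PySem.Int.toChars (i + 1), DigQ c := by
  unfold PySem.Int.toChars
  rw [if_neg (by omega)]
  unfold Nat.toDigits
  exact ⟨toDigitsCore_ne _ _ _ (fun _ => Nat.succ_ne_zero _), toDigitsCore_q _ _ _ (by simp)⟩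

-- ---- dedup equality and invariants ----
def stepA (js : List String) (element : String) : List String :=
  ((PySem.Chars.splitOn (PySem.Str.strip element).toList "\n\n".toList).map String.ofList).foldl
    (fun js sentence =>
      let s := PySem.Str.strip sentence
      if s ∈ js then js else js ++ [s]) js

lemma dedup_pair_inner (ps : List String) : ∀ (out : List String),
    ps.foldl (fun st sentence =>
        let p := PySem.Str.strip sentence
        if p ∈ st.1 then st else (PySem.Set.add st.1 p, st.2 ++ [p])) (out, out)
      = (ps.foldl (fun js sentence =>
          let s := PySem.Str.strip sentence
          if s ∈ js then js else js ++ [s]) out,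
         ps.foldl (fun js sentence =>
          let s := PySem.Str.strip sentence
          if s ∈ js then js else js ++ [s]) out) := by
  induction ps with
  | nil => intro out; rfl
  | cons a ps ih =>
    intro out
    rw [List.foldl_cons, List.foldl_cons]
    by_cases h : PySem.Str.strip a ∈ out
    · simp only [h, if_true]
      exact ih out
    · simp only [h, if_false]
      rw [PySem.Set.add_of_not_mem h]
      exact ih (out ++ [PySem.Str.strip a])

lemma dedup_pair (arr : List String) : ∀ (out : List String),
    arr.foldl (fun st element =>
      ((PySem.Chars.splitOn (PySem.Str.strip element).toList "\n\n".toList).map String.ofList).foldl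
        (fun st sentence =>
          let p := PySem.Str.strip sentence
          if p ∈ st.1 then st else (PySem.Set.add st.1 p, st.2 ++ [p])) st) (out, out)
    = (arr.foldl stepA out, arr.foldl stepA out) := by
  induction arr with
  | nil => intro out; rfl
  | cons e arr ih =>
    intro out
    rw [List.foldl_cons, List.foldl_cons, dedup_pair_inner]
    exact ih _

lemma dedup_stripped_inner (ps : List String) : ∀ (js : List String), (∀ s ∈ js, Stripped s) →
    ∀ s ∈ ps.foldl (fun js sentence =>
        let s := PySem.Str.strip sentence
        if s ∈ js then js else js ++ [s]) js, Stripped s := by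
  induction ps with
  | nil => intro js h; exact h
  | cons a ps ih =>
    intro js h
    rw [List.foldl_cons]
    by_cases hm : PySem.Str.strip a ∈ js
    · simp only [hm, if_true]; exact ih js h
    · simp only [hm, if_false]
      refine ih _ ?_
      intro s hs
      rcases List.mem_append.mp hs with hs | hs
      · exact h s hs
      · rcases List.mem_singleton.mp hs with rfl
        exact stripped_strip _

lemma dedup_stripped (arr : List String) : ∀ (init : List String), (∀ s ∈ init, Stripped s) →
    ∀ s ∈ arr.foldl stepA init, Stripped s := by
  induction arr with
  | nil => intro init h; exact h
  | cons e arr ih =>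
    intro init h
    rw [List.foldl_cons]
    exact ih _ (dedup_stripped_inner _ _ h)

-- ---- the build loop ----
lemma build_eq (llm : String) : ∀ (js : List String) (n : Nat) (r : List Char),
    (∀ s ∈ js, Stripped s) →
    (r = [] ∨ r.getLast? = some '\n') →
    ctxBuildA llm (PySem.List.enumerate js (n : Int)) r
      = r ++ ((PySem.List.enumerate (kA llm js ((PySem.Chars.split₀ r).length)) (n : Int)).map
          (fun p => pvChunk p ++ pvNl)).flatten := by
  intro js
  induction js with
  | nil =>
    intro n r _ _
    rw [PySem.List.enumerate_nil, kA, PySem.List.enumerate_nil]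
    simp [ctxBuildA]
  | cons s js ih =>
    intro n r hstr hr
    rw [PySem.List.enumerate_cons, ctxBuildA, kA]
    by_cases hc : 3072 ≤ (PySem.Chars.split₀ r).length ∧ llm = "mistral"
    · rw [if_pos hc, if_pos hc, PySem.List.enumerate_nil]
      simp
    · rw [if_neg hc, if_neg hc, PySem.List.enumerate_cons]
      have hw : ∀ c ∈ PySem.Int.toChars ((n : Int) + 1) ++ [':'], pvWs c = false := by
        intro c hcm
        rcases List.mem_append.mp hcm with hcm | hcm
        · exact ((toChars_q n (by omega)).2 c hcm).1
        · rcases List.mem_singleton.mp hcm with rfl; decide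
      have hw0 : PySem.Int.toChars ((n : Int) + 1) ++ [':'] ≠ [] := by simp
      have hC : r ++ PySem.Int.toChars ((n : Int) + 1) ++ ": ".toList ++ s.toList ++ "\n\n".toList
          = r ++ ((PySem.Int.toChars ((n : Int) + 1) ++ [':']) ++ ' ' :: (s.toList ++ pvNl)) := by
        show r ++ PySem.Int.toChars ((n : Int) + 1) ++ [':', ' '] ++ s.toList ++ ['\n', '\n'] = _
        simp [pvNl]
      have hwc : (PySem.Chars.split₀ (r ++ PySem.Int.toChars ((n : Int) + 1) ++ ": ".toList ++ s.toList ++ "\n\n".toList)).length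
          = (PySem.Chars.split₀ r).length + 1 + (PySem.Chars.split₀ s.toList).length := by
        rw [hC]
        rcases hr with rfl | hr
        · rw [List.nil_append, split₀_chunk _ _ hw0 hw]
          simp [PySem.Chars.split₀, PySem.Chars.split₀.go]
          omega
        · rw [split₀_append_nl _ _ hr, split₀_chunk _ _ hw0 hw]
          simp
          omega
      have hlast : r ++ PySem.Int.toChars ((n : Int) + 1) ++ ": ".toList ++ s.toList ++ "\n\n".toList = []
          ∨ (r ++ PySem.Int.toChars ((n : Int) + 1) ++ ": ".toList ++ s.toList ++ "\n\n".toList).getLast? = some '\n' := by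
        right
        rw [List.getLast?_append]
        rfl
      have hpush : ((n : Int) + 1) = ((n + 1 : Nat) : Int) := by push_cast; ring
      have ihh := ih (n + 1)
        (r ++ PySem.Int.toChars ((n : Int) + 1) ++ ": ".toList ++ s.toList ++ "\n\n".toList)
        (fun x hx => hstr x (List.mem_cons_of_mem _ hx)) hlast
      rw [hwc] at ihh
      rw [← hpush] at ihh
      rw [ihh]
      simp only [List.map_cons, List.flatten_cons]
      rw [hC]
      simp [pvChunk, pvNl, List.append_assoc]

-- ---- kept lists agree ----
lemma keptB_eq_kA (js : List String) : ∀ (t : Nat),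
    ctxKeptB js (t : Int) = kA "mistral" js t := by
  induction js with
  | nil => intro t; rfl
  | cons s js ih =>
    intro t
    rw [ctxKeptB, kA]
    by_cases h : 3072 ≤ t
    · rw [if_pos (by exact_mod_cast h), if_pos ⟨h, rfl⟩]
    · rw [if_neg (by exact_mod_cast h), if_neg (by simp [h])]
      have hlen : ((PySem.Str.split₀ s).length : Int) = ((PySem.Chars.split₀ s.toList).length : Int) := by
        simp [PySem.Str.split₀]
      rw [hlen]
      have : (t : Int) + 1 + ((PySem.Chars.split₀ s.toList).length : Int)
          = ((t + 1 + (PySem.Chars.split₀ s.toList).length : Nat) : Int) := by push_cast; ring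
      rw [this, ih]

lemma kA_of_ne (llm : String) (h : llm ≠ "mistral") : ∀ (js : List String) (t : Nat),
    kA llm js t = js := by
  intro js
  induction js with
  | nil => intro t; rfl
  | cons s js ih =>
    intro t
    rw [kA, if_neg (by simp [h]), ih]

lemma kA_mem (llm : String) : ∀ (js : List String) (t : Nat) (s : String),
    s ∈ kA llm js t → s ∈ js := by
  intro js
  induction js with
  | nil => intro t s h; rw [kA] at h; cases h
  | cons a js ih =>
    intro t s h
    rw [kA] at h
    by_cases hc : 3072 ≤ t ∧ llm = "mistral"
    · rw [if_pos hc] at h; cases h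
    · rw [if_neg hc] at h
      rcases List.mem_cons.mp h with rfl | h
      · exact List.mem_cons_self
      · exact List.mem_cons_of_mem _ (ih _ _ h)

-- ---- join / strip of the assembled text ----
lemma flatten_map_nl : ∀ (ps : List (List Char)), ps ≠ [] →
    (ps.map (· ++ pvNl)).flatten = PySem.Chars.join pvNl ps ++ pvNl := by
  intro ps
  induction ps with
  | nil => intro h; exact absurd rfl h
  | cons p ps ih =>
    intro _
    cases ps with
    | nil => simp [PySem.Chars.join_singleton]
    | cons q rest =>
      rw [List.map_cons, List.flatten_cons, ih (by simp), PySem.Chars.join_cons_cons]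
      simp [List.append_assoc]

lemma join_ends : ∀ (ps : List (List Char)), ps ≠ [] → (∀ p ∈ ps, p ≠ []) →
    PySem.Chars.join pvNl ps ≠ [] ∧
    (∀ c, (PySem.Chars.join pvNl ps).head? = some c → ∃ p ∈ ps, p.head? = some c) ∧
    (∀ c, (PySem.Chars.join pvNl ps).getLast? = some c → ∃ p ∈ ps, p.getLast? = some c) := by
  intro ps
  induction ps with
  | nil => intro h; exact absurd rfl h
  | cons p ps ih =>
    intro _ h1
    cases ps with
    | nil =>
      rw [PySem.Chars.join_singleton]
      exact ⟨h1 p (by simp), fun c hc => ⟨p, by simp, hc⟩, fun c hc => ⟨p, by simp, hc⟩⟩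
    | cons q rest =>
      have hp : p ≠ [] := h1 p (by simp)
      obtain ⟨hne, hh, hl⟩ := ih (by simp) (fun x hx => h1 x (List.mem_cons_of_mem _ hx))
      rw [PySem.Chars.join_cons_cons]
      refine ⟨by simp [hp], ?_, ?_⟩
      · intro c hc
        rw [List.append_assoc, List.head?_append_of_ne_nil _ hp] at hc
        exact ⟨p, by simp, hc⟩
      · intro c hc
        rw [List.append_assoc, List.getLast?_append] at hc
        rw [List.getLast?_append] at hc
        cases hj : (PySem.Chars.join pvNl (q :: rest)).getLast? with
        | none => exact absurd (List.getLast?_eq_none_iff.mp hj) hne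
        | some d =>
          rw [hj] at hc
          obtain rfl : d = c := by simpa using hc
          obtain ⟨x, hx, hx2⟩ := hl d hj
          exact ⟨x, List.mem_cons_of_mem _ hx, hx2⟩

lemma dropWhile_eq_self_of_head (p : Char → Bool) (l : List Char)
    (h : ∀ c ∈ l.head?, p c = false) : List.dropWhile p l = l := by
  cases l with
  | nil => rfl
  | cons x xs =>
    rw [List.dropWhile_cons, if_neg]
    simp [h x rfl]

lemma stripChars_append_nl (T : List Char) (hT : T ≠ [])
    (hh : ∀ c ∈ T.head?, c ≠ '\n') (hl : ∀ c ∈ T.getLast?, c ≠ '\n') :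
    PySem.Chars.stripChars (T ++ pvNl) pvNl = T := by
  simp only [PySem.Chars.stripChars]
  have hcontains : ∀ c : Char, c ≠ '\n' → pvNl.contains c = false := by
    intro c hc
    simp [pvNl, hc]
  have h1 : List.dropWhile (fun c => pvNl.contains c) (T ++ pvNl) = T ++ pvNl := by
    apply dropWhile_eq_self_of_head
    intro c hc
    rw [List.head?_append_of_ne_nil _ hT] at hc
    exact hcontains c (hh c hc)
  rw [h1]
  have h2 : (T ++ pvNl).reverse = '\n' :: '\n' :: T.reverse := by
    simp [pvNl]
  rw [h2]
  rw [List.dropWhile_cons, if_pos (by simp [pvNl]), List.dropWhile_cons, if_pos (by simp [pvNl])]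
  rw [dropWhile_eq_self_of_head _ _ ?_, List.reverse_reverse]
  intro c hc
  rw [List.head?_reverse] at hc
  exact hcontains c (hl c hc)

lemma ws_false_ne_nl {c : Char} (h : pvWs c = false) : c ≠ '\n' := by
  rintro rfl
  exact absurd h (by decide)

lemma chunk_ends (i : Int) (s : String) (hi : 0 ≤ i) (hs : Stripped s) :
    pvChunk (i, s) ≠ [] ∧ (∀ c ∈ (pvChunk (i, s)).head?, c ≠ '\n') ∧
      (∀ c ∈ (pvChunk (i, s)).getLast?, c ≠ '\n') := by
  obtain ⟨htc, hq⟩ := toChars_q i hi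
  unfold pvChunk
  refine ⟨by simp [htc], ?_, ?_⟩
  · intro c hc
    rw [List.head?_append_of_ne_nil _ htc] at hc
    exact (hq c (List.mem_of_mem_head? hc)).2
  · intro c hc
    rw [List.getLast?_append] at hc
    cases hst : s.toList with
    | nil =>
      rw [hst] at hc
      have h2 : ((':' :: ' ' :: ([] : List Char)).getLast?) = some ' ' := rfl
      rw [h2] at hc
      have hcc : some ' ' = some c := by simpa using hc
      cases hcc
      decide
    | cons x xs =>
      rw [hst] at hc
      have h2 : (':' :: ' ' :: (x :: xs)).getLast? = (x :: xs).getLast? := by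
        rw [List.getLast?_cons_cons, List.getLast?_cons_cons]
      rw [h2] at hc
      cases hgl : (x :: xs).getLast? with
      | none => simp at hgl
      | some d =>
        rw [hgl] at hc
        obtain rfl : d = c := by simpa using hc
        have hls := hs.2
        rw [hst] at hls
        exact ws_false_ne_nl (hls d hgl)

lemma enum_nonneg_mem' : ∀ (kept : List String) (n : Nat) (p : Int × String),
    p ∈ PySem.List.enumerate kept (n : Int) → (n : Int) ≤ p.1 ∧ p.2 ∈ kept := by
  intro kept
  induction kept with
  | nil => intro n p hp; rw [PySem.List.enumerate_nil] at hp; cases hp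
  | cons s rest ih =>
    intro n p hp
    rw [PySem.List.enumerate_cons] at hp
    rcases List.mem_cons.mp hp with rfl | hp
    · exact ⟨le_refl _, List.mem_cons_self⟩
    · have hcast : ((n : Int) + 1) = ((n + 1 : Nat) : Int) := by push_cast; ring
      rw [hcast] at hp
      obtain ⟨h1, h2⟩ := ih (n + 1) p hp
      exact ⟨by push_cast at h1 ⊢; omega, List.mem_cons_of_mem _ h2⟩

lemma enum_nonneg_mem (kept : List String) (p : Int × String)
    (hp : p ∈ PySem.List.enumerate kept 0) : 0 ≤ p.1 ∧ p.2 ∈ kept := by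
  have := enum_nonneg_mem' kept 0 p (by exact_mod_cast hp)
  exact_mod_cast this

lemma final_eq (kept : List String) (hk : ∀ s ∈ kept, Stripped s) :
    PySem.Chars.stripChars (((PySem.List.enumerate kept 0).map (fun p => pvChunk p ++ pvNl)).flatten) "\n\n".toList
      = PySem.Chars.join pvNl ((PySem.List.enumerate kept 0).map pvChunk) := by
  have hnl : "\n\n".toList = pvNl := rfl
  rw [hnl]
  cases kept with
  | nil => rw [PySem.List.enumerate_nil]; rfl
  | cons s0 rest =>
    set ps := (PySem.List.enumerate (s0 :: rest) 0).map pvChunk with hps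
    have hpsne : ps ≠ [] := by
      rw [hps, PySem.List.enumerate_cons]
      simp
    have hmem : ∀ p ∈ ps, p ≠ [] ∧ (∀ c ∈ p.head?, c ≠ '\n') ∧ (∀ c ∈ p.getLast?, c ≠ '\n') := by
      intro p hp
      rw [hps] at hp
      obtain ⟨q, hq, rfl⟩ := List.mem_map.mp hp
      obtain ⟨hq1, hq2⟩ := enum_nonneg_mem _ _ hq
      exact chunk_ends q.1 q.2 hq1 (hk _ hq2)
    have hmap : (PySem.List.enumerate (s0 :: rest) 0).map (fun p => pvChunk p ++ pvNl)
        = ps.map (· ++ pvNl) := by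
      rw [hps, List.map_map]
      rfl
    rw [hmap, flatten_map_nl ps hpsne]
    obtain ⟨hne, hh, hl⟩ := join_ends ps hpsne (fun p hp => (hmem p hp).1)
    apply stripChars_append_nl _ hne
    · intro c hc
      obtain ⟨p, hp, hp2⟩ := hh c hc
      exact (hmem p hp).2.1 c hp2
    · intro c hc
      obtain ⟨p, hp, hp2⟩ := hl c hc
      exact (hmem p hp).2.2 c hp2

-- ===== VERDICT (by name: the statement is the Claim_ definition above) =====
lemma dedup_pair0 (arr : List String) :
    arr.foldl (fun st element =>
      ((PySem.Chars.splitOn (PySem.Str.strip element).toList "\n\n".toList).map String.ofList).foldl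
        (fun st sentence =>
          let p := PySem.Str.strip sentence
          if p ∈ st.1 then st else (PySem.Set.add st.1 p, st.2 ++ [p])) st)
      ((PySem.Set.empty : PySem.Set String), ([] : List String))
    = (arr.foldl stepA [], arr.foldl stepA []) :=
  dedup_pair arr []

theorem context_joint_spec : Claim_equal_context_joint := by
  intro arr llm _
  show context_joint arr llm = context_joint_alt arr llm
  simp only [context_joint, context_joint_alt]
  rw [dedup_pair0]
  have hstep : (fun (js : List String) (element : String) =>
      ((PySem.Chars.splitOn (PySem.Str.strip element).toList "\n\n".toList).map String.ofList).foldl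
        (fun js sentence => if PySem.Str.strip sentence ∈ js then js else js ++ [PySem.Str.strip sentence]) js)
      = stepA := by
    funext js e
    rfl
  rw [hstep]
  set js := arr.foldl stepA [] with hjs
  have hstr : ∀ s ∈ js, Stripped s := dedup_stripped arr [] (by simp)
  have hkept : (if llm = "mistral" then ctxKeptB js 0 else js) = kA llm js 0 := by
    by_cases h : llm = "mistral"
    · rw [if_pos h, h]
      exact_mod_cast keptB_eq_kA js 0
    · rw [if_neg h, kA_of_ne llm h js 0]
  have hbuild := build_eq llm js 0 [] hstr (Or.inl rfl)
  rw [Nat.cast_zero] at hbuild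
  have h0 : ((PySem.Chars.split₀ ([] : List Char)).length) = 0 := rfl
  rw [h0] at hbuild
  rw [hbuild, List.nil_append, hkept]
  rw [final_eq _ (fun s hs => hstr s (kA_mem llm js 0 s hs))]
  unfold PySem.Str.join
  congr 1
  have hnl : ("\n\n".toList : List Char) = pvNl := rfl
  rw [hnl, List.map_map]
  congr 1
  apply List.map_congr_left
  intro p _
  simp [pvChunk, Function.comp, String.toList_ofList]
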